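-- pv_equiv track=rewrite | github.com/gaurav150/DSA | HACKEREARTH PROBLEMS/best_index.py | calculate_special_sum
-- ===== SOURCE A (Python) =====
-- def calculate_special_sum(arr, index, prefix_sum):
--     n = len(arr)
--     special_sum = 0
--     count = 1
--     current_index = index
--
--     while current_index + count <= n:
--         # Use prefix sum for O(1) range sum
--         group_sum = prefix_sum[current_index + count] - prefix_sum[current_index]
--         special_sum += group_sum
--         current_index += count
--         count += 1
--
--     return special_sum
-- ===== SOURCE B (Python) =====
-- import math
--
-- def calculate_special_sum(arr, index, prefix_sum):
--     # The loop's group sums telescope: after k groups the last prefix index is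
--     # index + k*(k+1)//2, with k the largest integer such that that stays <= len(arr).
--     n = len(arr)
--     d = n - index
--     if d < 1:
--         return 0
--     k = (math.isqrt(8 * d + 1) - 1) // 2
--     return prefix_sum[index + k * (k + 1) // 2] - prefix_sum[index]
-- ===== Notes on version B (the rewrite author's own statement) =====
-- stated objective: alternative
-- what changed: Replaced the group-summing loop by a closed form: the group sums telescope, so the result is prefix_sum[index + k(k+1)/2] - prefix_sum[index] with k obtained from the integer square root.
import Mathlib
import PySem

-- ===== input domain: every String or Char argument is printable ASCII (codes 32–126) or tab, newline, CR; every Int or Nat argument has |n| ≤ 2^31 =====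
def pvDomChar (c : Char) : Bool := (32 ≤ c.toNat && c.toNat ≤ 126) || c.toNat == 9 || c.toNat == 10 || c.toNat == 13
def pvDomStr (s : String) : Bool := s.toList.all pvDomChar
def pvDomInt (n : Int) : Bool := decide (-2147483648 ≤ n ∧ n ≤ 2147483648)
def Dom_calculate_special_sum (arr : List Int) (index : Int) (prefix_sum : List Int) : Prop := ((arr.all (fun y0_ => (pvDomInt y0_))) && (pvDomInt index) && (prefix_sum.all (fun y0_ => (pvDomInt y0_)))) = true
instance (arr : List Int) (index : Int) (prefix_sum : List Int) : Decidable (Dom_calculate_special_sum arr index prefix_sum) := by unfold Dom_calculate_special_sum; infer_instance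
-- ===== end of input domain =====

-- B replaces A's group-summing loop by the telescoped closed form
-- prefix_sum[index + k(k+1)/2] - prefix_sum[index], with k from the integer square root.

-- ===== PORT A =====
-- the while loop of A: state (special_sum, current_index, count)
def pvLoopA (n : Int) (ps : List Int) (special cur : Int) (count : Nat) : Int :=
  if cur + (count : Int) ≤ n then
    pvLoopA n ps (special + (PySem.List.pyGetD ps (cur + (count : Int)) 0 - PySem.List.pyGetD ps cur 0)) (cur + (count : Int)) (count + 1)
  else special
termination_by (n + 1 - cur - count).toNat
decreasing_by omega

def calculate_special_sum (arr : List Int) (index : Int) (prefix_sum : List Int) : Int :=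
  pvLoopA (arr.length : Int) prefix_sum 0 index 1

-- ===== PORT B =====
-- math.isqrt, ported as Newton's integer-square-root iteration (CPython's algorithm);
-- fuel-based structural recursion so that it evaluates in the kernel (Nat.sqrt does not)
def pvSqrtAux : Nat → Nat → Nat → Nat
  | 0, _, x => x
  | fuel + 1, n, x =>
    if (x + n / x) / 2 < x then pvSqrtAux fuel n ((x + n / x) / 2) else x

def pvSqrt (n : Nat) : Nat := if n ≤ 1 then n else pvSqrtAux n n n

-- k = (isqrt(8d+1)-1)//2
def pvKf (d : Nat) : Nat := (pvSqrt (8 * d + 1) - 1) / 2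

def calculate_special_sum_alt (arr : List Int) (index : Int) (prefix_sum : List Int) : Int :=
  let n : Int := (arr.length : Int)
  let d : Int := n - index
  if d < 1 then 0
  else
    let k : Nat := pvKf d.toNat
    PySem.List.pyGetD prefix_sum (index + ((k * (k + 1) / 2 : Nat) : Int)) 0 -
      PySem.List.pyGetD prefix_sum index 0

-- ===== PRECONDITION & SPEC =====
-- Pre_ excludes exactly the inputs on which A raises IndexError: when the loop runs
-- (index + 1 <= len(arr)), every prefix_sum access is index + j(j+1)/2 for some j with
-- index + j(j+1)/2 <= len(arr), so each such position must be a valid Python index of prefix_sum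
-- (j(j+1)/2 <= len(arr) - index forces j <= len(arr) + len(prefix_sum), hence the bound on j).
def Pre_calculate_special_sum (arr : List Int) (index : Int) (prefix_sum : List Int) : Prop :=
  (arr.length : Int) < index + 1 ∨
    (-(prefix_sum.length : Int) ≤ index ∧
      ∀ j : Nat, j < arr.length + prefix_sum.length + 2 →
        index + ((j * (j + 1) / 2 : Nat) : Int) ≤ (arr.length : Int) →
        index + ((j * (j + 1) / 2 : Nat) : Int) < (prefix_sum.length : Int))
instance (arr : List Int) (index : Int) (prefix_sum : List Int) : Decidable (Pre_calculate_special_sum arr index prefix_sum) := by unfold Pre_calculate_special_sum; infer_instance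

def pvWitness_calculate_special_sum : List Int × Int × List Int := ([1, 2, 3], 0, [0, 1, 3, 6])

def Spec_calculate_special_sum (arr : List Int) (index : Int) (prefix_sum : List Int) (out : Int) : Prop := out = calculate_special_sum_alt arr index prefix_sum
instance (arr : List Int) (index : Int) (prefix_sum : List Int) (out : Int) : Decidable (Spec_calculate_special_sum arr index prefix_sum out) := by unfold Spec_calculate_special_sum; infer_instance

-- ===== CLAIM (what is proved, stated in full; the proofs are below) =====
def Claim_equal_calculate_special_sum : Prop := ∀ (arr : List Int) (index : Int) (prefix_sum : List Int), Dom_calculate_special_sum arr index prefix_sum → Pre_calculate_special_sum arr index prefix_sum → Spec_calculate_special_sum arr index prefix_sum (calculate_special_sum arr index prefix_sum)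

-- ===== LEMMAS AND PROOFS =====

-- triangular numbers, recursively (for proofs); pvT_eq bridges to the k(k+1)/2 formula
def pvT : Nat → Nat
  | 0 => 0
  | j + 1 => pvT j + (j + 1)

lemma two_pvT (j : Nat) : 2 * pvT j = j * (j + 1) := by
  induction j with
  | zero => rfl
  | succ j ih => simp only [pvT]; ring_nf; ring_nf at ih; omega

lemma pvT_eq (j : Nat) : pvT j = j * (j + 1) / 2 := by
  have := two_pvT j; omega

lemma pvT_step {c : Nat} (hc : 1 ≤ c) : pvT c = pvT (c - 1) + c := by
  cases c with
  | zero => omega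
  | succ c' => simp [pvT]

lemma pvT_mono {a b : Nat} (h : a ≤ b) : pvT a ≤ pvT b := by
  induction b with
  | zero => simp [Nat.le_zero.mp h]
  | succ b ih =>
    rcases Nat.eq_or_lt_of_le h with rfl | h'
    · omega
    · have := ih (by omega); simp [pvT]; omega

-- Newton invariant: with enough fuel the iteration returns the floor square root
lemma pvSqrtAux_bounds (fuel : Nat) : ∀ (n x : Nat), 1 ≤ n → 1 ≤ x → n < (x + 1) * (x + 1) →
    x ≤ fuel → pvSqrtAux fuel n x * pvSqrtAux fuel n x ≤ n ∧
      n < (pvSqrtAux fuel n x + 1) * (pvSqrtAux fuel n x + 1) := by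
  induction fuel with
  | zero => intro n x _ hx _ hf; omega
  | succ fuel ih =>
    intro n x hn hx hinv hf
    rw [pvSqrtAux]
    have hq1 : x * (n / x) ≤ n := Nat.mul_div_le n x
    have hq2 : n < x * (n / x) + x := by
      have h := (Nat.div_add_mod n x).symm
      have h2 : n % x < x := Nat.mod_lt n (by omega)
      omega
    have hm1 : 2 * ((x + n / x) / 2) ≤ x + n / x := by omega
    have hm2 : x + n / x < 2 * ((x + n / x) / 2) + 2 := by omega
    by_cases hlt : (x + n / x) / 2 < x
    · rw [if_pos hlt]
      have hinv' : n < ((x + n / x) / 2 + 1) * ((x + n / x) / 2 + 1) := by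
        zify at hq1 hq2 hm1 hm2 ⊢
        have h4 : ((x : Int) + (n / x : Nat) + 1) ≤ 2 * (((x + n / x) / 2 : Nat) : Int) + 2 := by omega
        have hsq : ((x : Int) + (n / x : Nat) + 1) * ((x : Int) + (n / x : Nat) + 1) ≤
            (2 * (((x + n / x) / 2 : Nat) : Int) + 2) * (2 * (((x + n / x) / 2 : Nat) : Int) + 2) :=
          mul_le_mul h4 h4 (by positivity) (by positivity)
        nlinarith [sq_nonneg ((x : Int) - (n / x : Nat) - 1), hsq, hq2]
      have hx'1 : 1 ≤ (x + n / x) / 2 := by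
        by_cases hx2 : 2 ≤ x
        · calc 1 ≤ x / 2 := by omega
            _ ≤ (x + n / x) / 2 := Nat.div_le_div_right (Nat.le_add_right x (n / x))
        · have hx1 : x = 1 := by omega
          subst hx1
          rw [Nat.div_one]; omega
      exact ih n _ hn hx'1 hinv' (by omega)
    · rw [if_neg hlt]
      have hxq : x ≤ n / x := by omega
      exact ⟨by nlinarith, hinv⟩

lemma pvSqrt_bounds (n : Nat) (hn : 1 ≤ n) :
    pvSqrt n * pvSqrt n ≤ n ∧ n < (pvSqrt n + 1) * (pvSqrt n + 1) := by
  unfold pvSqrt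
  by_cases h1 : n ≤ 1
  · rw [if_pos h1]; interval_cases n; omega
  · rw [if_neg h1]
    exact pvSqrtAux_bounds n n n hn (by omega) (by nlinarith) le_rfl

-- bounds for the quadratic-formula k: T(k) ≤ d < T(k+1)
lemma pvKf_bounds (d : Nat) : pvT (pvKf d) ≤ d ∧ d < pvT (pvKf d + 1) := by
  set s := pvSqrt (8 * d + 1) with hs
  obtain ⟨h1, h2⟩ := pvSqrt_bounds (8 * d + 1) (by omega)
  rw [← hs] at h1 h2
  have hs1 : 1 ≤ s := by nlinarith
  set k := pvKf d with hk
  have hk2 : 2 * k ≤ s - 1 ∧ s - 1 < 2 * k + 2 := by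
    unfold pvKf at hk; rw [← hs] at hk; omega
  have hkl : 2 * k + 1 ≤ s := by omega
  have hku : s ≤ 2 * k + 2 := by omega
  have t1 := two_pvT k
  have t2 := two_pvT (k + 1)
  constructor
  · nlinarith
  · nlinarith

-- the index reached by the loop, ignoring the sums
def pvF (n cur : Int) (count : Nat) : Int :=
  if cur + (count : Int) ≤ n then pvF n (cur + (count : Int)) (count + 1) else cur
termination_by (n + 1 - cur - count).toNat
decreasing_by omega

-- the loop telescopes
lemma pvLoopA_tele (n : Int) (ps : List Int) (special cur : Int) (count : Nat) :
    pvLoopA n ps special cur count =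
      special + (PySem.List.pyGetD ps (pvF n cur count) 0 - PySem.List.pyGetD ps cur 0) := by
  fun_induction pvLoopA n ps special cur count with
  | case1 special cur count h ih =>
    rw [pvF, if_pos h, ih]; ring
  | case2 special cur count h =>
    rw [pvF, if_neg h]; ring

-- where the loop index lands
lemma pvF_char (m : Nat) : ∀ (c K : Nat) (i n : Int), 1 ≤ c → K = c - 1 + m →
    i + (pvT K : Int) ≤ n → n < i + (pvT (K + 1) : Int) →
    pvF n (i + (pvT (c - 1) : Int)) c = i + (pvT K : Int) := by
  induction m with
  | zero =>
    intro c K i n hc hK hle hlt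
    have hKc : K = c - 1 := by omega
    subst hKc
    have h2 : pvT (c - 1 + 1) = pvT (c - 1) + c := by
      have hc1 : c - 1 + 1 = c := by omega
      rw [hc1, pvT_step hc]
    rw [h2] at hlt
    rw [pvF, if_neg (by push_cast at hlt ⊢; omega)]
  | succ m ih =>
    intro c K i n hc hK hle hlt
    have hcK : c ≤ K := by omega
    have hmono : pvT c ≤ pvT K := pvT_mono hcK
    have hstep : pvT c = pvT (c - 1) + c := pvT_step hc
    rw [pvF, if_pos (by omega)]
    have heq : i + (pvT (c - 1) : Int) + (c : Int) = i + (pvT ((c + 1) - 1) : Int) := by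
      simp only [Nat.add_sub_cancel]; omega
    rw [heq]
    exact ih (c + 1) K i n (by omega) (by omega) hle hlt

-- ===== VERDICT (by name: the statement is the Claim_ definition above) =====
theorem calculate_special_sum_spec : Claim_equal_calculate_special_sum := by
  intro arr index ps _ _
  unfold Spec_calculate_special_sum calculate_special_sum calculate_special_sum_alt
  rw [pvLoopA_tele]
  set n : Int := (arr.length : Int) with hn
  by_cases hd : n - index < 1
  · rw [if_pos hd, pvF, if_neg (by push_cast; omega)]
    ring
  · rw [if_neg hd]
    set k := pvKf (n - index).toNat with hk
    obtain ⟨hb1, hb2⟩ := pvKf_bounds (n - index).toNat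
    rw [← hk] at hb1 hb2
    have hdt : ((n - index).toNat : Int) = n - index := by omega
    have hch := pvF_char k 1 k index n (by omega) (by omega)
      (by omega) (by omega)
    have h0 : (pvT (1 - 1) : Int) = 0 := by norm_num [pvT]
    rw [h0, add_zero] at hch
    rw [hch, pvT_eq]
    ring
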